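-- pv_equiv track=rewrite | github.com/omshivarjun/vision-platform | services/ai/services/accessibility_service.py | _assess_overall_safety
-- ===== SOURCE A (Python) =====
-- from typing import List, Dict, Any, Tuple
--
-- def _assess_overall_safety(obstacles: List[Dict[str, Any]]) -> str:
--     """Assess overall safety level based on all obstacles"""
--     if not obstacles:
--         return "safe"
--
--     high_severity_count = sum(1 for obs in obstacles if obs["severity"] == "high")
--     medium_severity_count = sum(1 for obs in obstacles if obs["severity"] == "medium")
--
--     if high_severity_count > 0:
--         return "dangerous"
--     elif medium_severity_count > 2:
--         return "caution"
--     elif medium_severity_count > 0: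
--         return "moderate"
--     else:
--         return "safe"
-- ===== SOURCE B (Python) =====
-- def _assess_overall_safety(obstacles):
--     """Assess overall safety level: one early-exit streaming pass with a saturating counter."""
--     mediums = 0
--     for obs in obstacles:
--         sev = obs["severity"]
--         if sev == "high":
--             return "dangerous"
--         if sev == "medium" and mediums < 3:
--             mediums += 1
--     if mediums == 0:
--         return "safe"
--     if mediums > 2:
--         return "caution"
--     return "moderate"
-- ===== Notes on version B (the rewrite author's own statement) =====
-- stated objective: alternative
-- what changed: B replaces A's empty guard plus two full counting scans with a single streaming pass that returns 'dangerous' immediately at the first high-severity obstacle and keeps only a medium counter saturated at 3, classifying from that state at the end.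
import Mathlib
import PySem

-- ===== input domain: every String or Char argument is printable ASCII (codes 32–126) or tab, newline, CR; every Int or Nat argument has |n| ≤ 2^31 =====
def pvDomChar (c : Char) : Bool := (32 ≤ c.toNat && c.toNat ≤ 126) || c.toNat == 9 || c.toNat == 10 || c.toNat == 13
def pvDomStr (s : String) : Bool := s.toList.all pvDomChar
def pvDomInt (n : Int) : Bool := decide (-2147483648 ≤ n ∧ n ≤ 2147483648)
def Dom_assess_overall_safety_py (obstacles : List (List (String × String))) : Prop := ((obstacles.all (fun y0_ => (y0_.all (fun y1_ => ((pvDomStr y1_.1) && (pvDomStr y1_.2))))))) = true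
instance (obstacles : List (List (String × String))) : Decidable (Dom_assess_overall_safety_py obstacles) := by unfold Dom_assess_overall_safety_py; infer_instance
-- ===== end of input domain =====

-- B is a single early-exit streaming pass with a medium counter saturated at 3, instead of A's empty guard plus two full counting scans (alternative decomposition; return value only).

-- ===== PORT A =====
-- obs["severity"]: first-match association-list lookup (dict convention); none = KeyError, excluded by Pre_
def pvSev? (obs : List (String × String)) : Option String :=
  (obs.find? (fun p => p.1 == "severity")).map (·.2)

def assess_overall_safety_py (obstacles : List (List (String × String))) : String :=
  if obstacles = [] then "safe"
  else
    let high_severity_count : Int :=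
      obstacles.foldl (fun n obs => if pvSev? obs = some "high" then n + 1 else n) 0
    let medium_severity_count : Int :=
      obstacles.foldl (fun n obs => if pvSev? obs = some "medium" then n + 1 else n) 0
    if high_severity_count > 0 then "dangerous"
    else if medium_severity_count > 2 then "caution"
    else if medium_severity_count > 0 then "moderate"
    else "safe"

-- ===== PORT B =====
-- severity key of an obstacle; the "" default is only reached on a missing key (KeyError in Python, excluded by Pre_)
def pvSevKey (obs : List (String × String)) : String := (pvSev? obs).getD ""

-- B's for-loop with its early 'return "dangerous"' and saturating counter, as structural recursion over the list
def pvAltGo (l : List (List (String × String))) (mediums : Int) : String :=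
  match l with
  | [] =>
    if mediums = 0 then "safe"
    else if mediums > 2 then "caution"
    else "moderate"
  | obs :: rest =>
    let sev := pvSevKey obs
    if sev = "high" then "dangerous"
    else pvAltGo rest (if sev = "medium" ∧ mediums < 3 then mediums + 1 else mediums)

def assess_overall_safety_py_alt (obstacles : List (List (String × String))) : String :=
  pvAltGo obstacles 0

-- ===== PRECONDITION & SPEC =====
-- Pre_ excludes exactly the inputs where some obstacle dict has no "severity" key: there Python A raises KeyError.
def Pre_assess_overall_safety_py (obstacles : List (List (String × String))) : Prop :=
  (obstacles.all (fun obs => obs.any (fun p => p.1 == "severity"))) = true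
instance (obstacles : List (List (String × String))) : Decidable (Pre_assess_overall_safety_py obstacles) := by unfold Pre_assess_overall_safety_py; infer_instance

def pvWitness_assess_overall_safety_py : (List (List (String × String))) :=
  [[("severity", "medium")], [("severity", "low")]]

def Spec_assess_overall_safety_py (obstacles : List (List (String × String))) (out : String) : Prop := out = assess_overall_safety_py_alt obstacles
instance (obstacles : List (List (String × String))) (out : String) : Decidable (Spec_assess_overall_safety_py obstacles out) := by unfold Spec_assess_overall_safety_py; infer_instance

-- ===== CLAIM (what is proved, stated in full; the proofs are below) =====
def Claim_equal_assess_overall_safety_py : Prop := ∀ (obstacles : List (List (String × String))), Dom_assess_overall_safety_py obstacles → Pre_assess_overall_safety_py obstacles → Spec_assess_overall_safety_py obstacles (assess_overall_safety_py obstacles)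

-- ===== LEMMAS AND PROOFS =====

-- A's counting fold equals the multiplicity of s in the list of severity keys (for s ≠ "").
lemma pv_foldA_count (s : String) (hs : s ≠ "") (l : List (List (String × String))) :
    ∀ n : Int, l.foldl (fun n obs => if pvSev? obs = some s then n + 1 else n) n
      = n + ((l.map pvSevKey).count s : Int) := by
  induction l with
  | nil => intro n; simp
  | cons obs l ih =>
    intro n
    have hkey : (pvSevKey obs = s) ↔ (pvSev? obs = some s) := by
      unfold pvSevKey
      cases h : pvSev? obs with
      | none => simp [Option.getD]; exact fun h' => (hs h').elim
      | some t => simp [Option.getD]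
    simp only [List.foldl, List.map, List.count_cons]
    by_cases h : pvSev? obs = some s
    · rw [if_pos h, ih]
      simp only [beq_iff_eq, hkey.mpr h]
      push_cast; ring
    · rw [if_neg h, ih]
      have hb : (pvSevKey obs == s) = false := by
        simp only [beq_eq_false_iff_ne, ne_eq]
        exact fun hh => h (hkey.mp hh)
      simp [hb]

-- Characterisation of B's streaming pass: "dangerous" iff a high severity occurs,
-- otherwise the verdict of the saturated total min (m + #mediums) 3.
lemma pv_altGo_char (l : List (List (String × String))) :
    ∀ m : Int, 0 ≤ m → m ≤ 3 →
      pvAltGo l m =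
        if l.any (fun obs => pvSevKey obs == "high") then "dangerous"
        else
          let c : Int := min (m + ((l.map pvSevKey).count "medium" : Int)) 3
          if c = 0 then "safe" else if c > 2 then "caution" else "moderate" := by
  induction l with
  | nil =>
    intro m h0 h3
    simp only [pvAltGo, List.any_nil, List.map_nil, List.count_nil, if_neg Bool.false_ne_true]
    split_ifs <;> first | rfl | omega
  | cons obs l ih =>
    intro m h0 h3
    simp only [pvAltGo, List.any_cons, List.map_cons, List.count_cons]
    by_cases hh : pvSevKey obs = "high"
    · simp [hh]
    · rw [if_neg hh]
      by_cases hm : pvSevKey obs = "medium"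
      · have hb : (pvSevKey obs == "medium") = true := by simp [hm]
        by_cases hlt : m < 3
        · rw [if_pos ⟨hm, hlt⟩, ih (m + 1) (by omega) (by omega)]
          have : min (m + 1 + ((l.map pvSevKey).count "medium" : Int)) 3
               = min (m + (((l.map pvSevKey).count "medium" : Int) + 1)) 3 := by omega
          simp [hb, hh, this]
        · have hm3 : m = 3 := by omega
          rw [if_neg (by exact fun h => hlt h.2), ih m h0 h3]
          have hcnn : (0:Int) ≤ ((l.map pvSevKey).count "medium" : Int) := by positivity
          have e1 : min (m + ((l.map pvSevKey).count "medium" : Int)) 3 = 3 := by omega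
          have e2 : min (m + (((l.map pvSevKey).count "medium" : Int) + 1)) 3 = 3 := by omega
          simp [hb, hh, e1, e2]
      · have hb : (pvSevKey obs == "medium") = false := by simp [hm]
        rw [if_neg (by exact fun h => hm h.1), ih m h0 h3]
        simp [hb, hh]

-- ===== VERDICT =====
theorem assess_overall_safety_py_spec : Claim_equal_assess_overall_safety_py := by
  intro obstacles _ _
  unfold Spec_assess_overall_safety_py assess_overall_safety_py assess_overall_safety_py_alt
  rw [pv_altGo_char obstacles 0 (by norm_num) (by norm_num)]
  by_cases hnil : obstacles = []
  · simp [hnil]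
  · simp only [if_neg hnil]
    rw [pv_foldA_count "high" (by decide) obstacles 0,
        pv_foldA_count "medium" (by decide) obstacles 0]
    set c : Int := ((obstacles.map pvSevKey).count "medium" : Int) with hc
    have hcnn : 0 ≤ c := by positivity
    by_cases hhigh : (obstacles.any (fun obs => pvSevKey obs == "high")) = true
    · have : (0:Int) < ((obstacles.map pvSevKey).count "high" : Int) := by
        have : "high" ∈ obstacles.map pvSevKey := by
          rcases List.any_eq_true.mp hhigh with ⟨o, ho, hho⟩
          exact List.mem_map.mpr ⟨o, ho, by simpa using hho⟩
        exact_mod_cast List.count_pos_iff.mpr this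
      simp only [if_pos hhigh]
      rw [if_pos (by simpa using this)]
    · have hzero : ((obstacles.map pvSevKey).count "high" : Int) = 0 := by
        have : "high" ∉ obstacles.map pvSevKey := by
          intro hmem
          rcases List.mem_map.mp hmem with ⟨o, ho, hho⟩
          exact hhigh (List.any_eq_true.mpr ⟨o, ho, by simp [hho]⟩)
        exact_mod_cast List.count_eq_zero.mpr this
      simp only [if_neg hhigh, hzero]
      rw [if_neg (by omega)]
      split_ifs <;> first | rfl | omega
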